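-- pv_equiv track=rewrite | github.com/Simba256/Competitive-Programming | AdventOfCode/2023/9/Day9.py | find_alternating_sum_first_column
-- ===== SOURCE A (Python) =====
-- def find_alternating_sum_first_column(sequence):
--     n = len(sequence)
--
--     # Create the differences triangle
--     triangle = [sequence]
--     for i in range(n - 1):
--         next_row = [triangle[i][j + 1] - triangle[i][j] for j in range(len(triangle[i]) - 1)]
--         triangle.append(next_row)
--
--     # Find the alternating sum of the first column
--     first_column = [triangle[j][0] if j % 2 == 0 else -triangle[j][0] for j in range(n)]
--     alternating_sum = sum(first_column)
--
--     return alternating_sum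
-- ===== SOURCE B (Python) =====
-- def find_alternating_sum_first_column(sequence):
--     # Hockey-stick closed form: sum = sum_k (-1)^k * C(n, k+1) * sequence[k],
--     # with the binomial coefficient maintained incrementally in one pass.
--     # (Alternative algorithm: O(n) arithmetic operations instead of A's O(n^2).)
--     n = len(sequence)
--     total = 0
--     c = n  # C(n, 1)
--     for k, x in enumerate(sequence):
--         total += x * c if k % 2 == 0 else -x * c
--         c = c * (n - k - 1) // (k + 2)
--     return total
-- ===== Notes on version B (the rewrite author's own statement) =====
-- stated objective: alternative
-- what changed: Replaced the O(n^2)-operation construction of the full difference triangle by a single pass computing the closed form sum_k (-1)^k * C(n,k+1) * sequence[k] (hockey-stick identity), maintaining the binomial coefficient incrementally; fewer arithmetic operations, but the coefficients are huge integers, so wall-clock speed was not confirmed.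
import Mathlib
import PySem

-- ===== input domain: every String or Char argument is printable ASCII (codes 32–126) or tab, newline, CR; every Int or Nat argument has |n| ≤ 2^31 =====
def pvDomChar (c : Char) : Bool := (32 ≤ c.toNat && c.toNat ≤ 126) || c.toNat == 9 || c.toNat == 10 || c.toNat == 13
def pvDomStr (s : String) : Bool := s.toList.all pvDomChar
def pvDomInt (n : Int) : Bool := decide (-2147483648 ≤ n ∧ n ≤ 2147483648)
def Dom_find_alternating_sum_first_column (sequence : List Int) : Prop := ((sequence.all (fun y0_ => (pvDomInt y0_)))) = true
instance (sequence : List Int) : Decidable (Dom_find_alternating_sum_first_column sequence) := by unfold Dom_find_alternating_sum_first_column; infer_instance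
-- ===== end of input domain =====

-- B replaces A's difference-triangle construction by the one-pass closed form
-- sum_k (-1)^k * C(n,k+1) * sequence[k] (hockey-stick identity); objective: alternative.

-- ===== PORT A =====
-- All list indices in A are nonnegative and in range (triangle[i] during iteration i,
-- row[j], row[j+1] with j < len(row)-1, triangle[j][0] with row j nonempty), so the
-- plain Nat-indexed List.getD is exact here.
def find_alternating_sum_first_column (sequence : List Int) : Int :=
  let n := sequence.length
  let triangle := (List.range (n - 1)).foldl (fun tri i =>
    let row := tri.getD i []
    let next_row := (List.range (row.length - 1)).map (fun j => row.getD (j + 1) 0 - row.getD j 0)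
    tri ++ [next_row]) [sequence]
  let first_column := (List.range n).map (fun j =>
    if j % 2 = 0 then (triangle.getD j []).getD 0 0 else -((triangle.getD j []).getD 0 0))
  first_column.sum

-- ===== PORT B =====
def find_alternating_sum_first_column_alt (sequence : List Int) : Int :=
  let n : Int := sequence.length
  let res := (PySem.List.enumerate sequence 0).foldl
    (fun (st : Int × Int) (p : Int × Int) =>
      (if PySem.Int.mod p.1 2 = 0 then st.1 + p.2 * st.2 else st.1 - p.2 * st.2,
       PySem.Int.floordiv (st.2 * (n - p.1 - 1)) (p.1 + 2)))
    (0, n)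
  res.1

-- ===== PRECONDITION & SPEC =====
def Spec_find_alternating_sum_first_column (sequence : List Int) (out : Int) : Prop := out = find_alternating_sum_first_column_alt sequence
instance (sequence : List Int) (out : Int) : Decidable (Spec_find_alternating_sum_first_column sequence out) := by unfold Spec_find_alternating_sum_first_column; infer_instance

-- ===== CLAIM (what is proved, stated in full; the proofs are below) =====
def Claim_equal_find_alternating_sum_first_column : Prop := ∀ (sequence : List Int), Dom_find_alternating_sum_first_column sequence → Spec_find_alternating_sum_first_column sequence (find_alternating_sum_first_column sequence)

-- ===== LEMMAS AND PROOFS =====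

/-- One difference step of the triangle (proof-side helper). -/
def pdiff : List Int → List Int
  | a :: b :: t => (b - a) :: pdiff (b :: t)
  | _ => []

/-- The closed-form alternating binomial sum both programs compute. -/
def bform (seq : List Int) : Int :=
  ∑ k ∈ Finset.range seq.length,
    (-1 : Int) ^ k * ((seq.length.choose (k + 1) : Nat) : Int) * seq.getD k 0

theorem pdiff_length (xs : List Int) : (pdiff xs).length = xs.length - 1 := by
  induction xs with
  | nil => simp [pdiff]
  | cons a t ih =>
    cases t with
    | nil => simp [pdiff]
    | cons b t' => simp [pdiff] at ih ⊢; omega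

theorem pdiff_getD (xs : List Int) (k : Nat) (h : k + 1 < xs.length) :
    (pdiff xs).getD k 0 = xs.getD (k + 1) 0 - xs.getD k 0 := by
  induction xs generalizing k with
  | nil => simp at h
  | cons a t ih =>
    cases t with
    | nil => simp at h
    | cons b t' =>
      cases k with
      | zero => simp [pdiff]
      | succ k' =>
        simp only [pdiff, List.getD_cons_succ]
        exact ih k' (by simpa using h)

theorem rowmap (row : List Int) :
    (List.range (row.length - 1)).map (fun j => row.getD (j + 1) 0 - row.getD j 0)
      = pdiff row := by
  apply List.ext_getElem
  · simp [pdiff_length]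
  · intro i h1 h2
    have hi : i < row.length - 1 := by simpa [pdiff_length] using h2
    simp only [List.getElem_map, List.getElem_range]
    rw [← List.getD_eq_getElem (pdiff row) 0 h2]
    exact (pdiff_getD row i (by omega)).symm

theorem sum_map_range (f : Nat → Int) (n : Nat) :
    ((List.range n).map f).sum = ∑ k ∈ Finset.range n, f k := by
  induction n with
  | zero => simp
  | succ m ih => simp [List.range_succ, Finset.sum_range_succ, ih]

theorem my_sign_pow (j : Nat) (v : Int) :
    (if j % 2 = 0 then v else -v) = (-1 : Int) ^ j * v := by
  rcases Nat.even_or_odd j with h | h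
  · rw [if_pos (Nat.even_iff.mp h), h.neg_one_pow, one_mul]
  · rw [if_neg (by simpa [Nat.odd_iff] using h), h.neg_one_pow, neg_one_mul]

/-- The triangle loop builds exactly the iterated-difference rows. -/
theorem tri_build (seq : List Int) (m : Nat) :
    (List.range m).foldl (fun tri i =>
      let row := tri.getD i []
      let next_row := (List.range (row.length - 1)).map
        (fun j => row.getD (j + 1) 0 - row.getD j 0)
      tri ++ [next_row]) [seq]
    = (List.range (m + 1)).map (fun i => pdiff^[i] seq) := by
  induction m with
  | zero => simp
  | succ m ih =>
    rw [List.range_succ, List.foldl_append, ih]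
    simp only [List.foldl_cons, List.foldl_nil]
    have hget : ((List.range (m + 1)).map (fun i => pdiff^[i] seq)).getD m [] = pdiff^[m] seq := by
      rw [List.getD_eq_getElem _ _ (by simp), List.getElem_map, List.getElem_range]
    rw [hget, rowmap, ← Function.iterate_succ_apply' pdiff m seq]
    rw [List.range_succ (n := m + 1), List.map_append]
    simp

/-- Main identity: the alternating sum of the heads of the iterated differences
equals the closed-form binomial sum. -/
theorem G_eq_bform : ∀ (N : Nat) (seq : List Int), seq.length = N →
    (∑ j ∈ Finset.range seq.length, (-1 : Int) ^ j * (pdiff^[j] seq).getD 0 0) = bform seq := by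
  intro N
  induction N using Nat.strong_induction_on with
  | _ N ih =>
    intro seq hlen
    cases seq with
    | nil => simp [bform]
    | cons a t =>
      set m := t.length with hm
      have hm1 : m + 1 = N := by simp only [List.length_cons, ← hm] at hlen; omega
      have hplen : (pdiff (a :: t)).length = m := by simp [pdiff_length, ← hm]
      have hrec : (∑ j ∈ Finset.range (pdiff (a :: t)).length,
          (-1 : Int) ^ j * (pdiff^[j] (pdiff (a :: t))).getD 0 0) = bform (pdiff (a :: t)) := by
        have hmN : (pdiff (a :: t)).length < N := by
          rw [hplen]; omega
        exact ih _ hmN _ rfl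
      -- rewrite LHS using the recursion
      have lhs_eq : (∑ j ∈ Finset.range (a :: t).length,
          (-1 : Int) ^ j * (pdiff^[j] (a :: t)).getD 0 0)
          = a - bform (pdiff (a :: t)) := by
        rw [← hrec, hplen]
        have : (a :: t).length = m + 1 := by simp [hm]
        rw [this, Finset.sum_range_succ']
        simp only [Function.iterate_succ_apply, Function.iterate_zero_apply, pow_succ,
          pow_zero, one_mul, List.getD_cons_zero]
        rw [show (∑ i ∈ Finset.range m, (-1:Int)^i * -1 * (pdiff^[i] (pdiff (a :: t))).getD 0 0)
            = -(∑ i ∈ Finset.range m, (-1:Int)^i * (pdiff^[i] (pdiff (a :: t))).getD 0 0) by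
          rw [← Finset.sum_neg_distrib]
          exact Finset.sum_congr rfl (fun i _ => by ring)]
        ring
      rw [lhs_eq]
      -- now the binomial algebra
      have hbd : bform (pdiff (a :: t))
          = ∑ k ∈ Finset.range m, (-1:Int)^k * ((m.choose (k+1) : Nat) : Int)
              * ((a :: t).getD (k+1) 0 - (a :: t).getD k 0) := by
        unfold bform
        rw [hplen]
        refine Finset.sum_congr rfl (fun k hk => ?_)
        have hk' : k < m := Finset.mem_range.mp hk
        rw [pdiff_getD (a :: t) k (by simp; omega)]
      rw [hbd]
      unfold bform
      have hlen1 : (a :: t).length = m + 1 := by simp [hm]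
      rw [hlen1]
      have pas : ∀ k : Nat, (((m+1).choose (k+1) : Nat) : Int)
          = ((m.choose k : Nat) : Int) + ((m.choose (k+1) : Nat) : Int) := by
        intro k; exact_mod_cast Nat.choose_succ_succ m k
      calc a - ∑ k ∈ Finset.range m, (-1:Int)^k * ((m.choose (k+1) : Nat) : Int)
              * ((a :: t).getD (k+1) 0 - (a :: t).getD k 0)
          = (∑ k ∈ Finset.range m, (-1:Int)^(k+1) * ((m.choose (k+1) : Nat) : Int)
              * (a :: t).getD (k+1) 0 + (-1:Int)^0 * ((m.choose 0 : Nat) : Int) * (a :: t).getD 0 0)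
            + ∑ k ∈ Finset.range m, (-1:Int)^k * ((m.choose (k+1) : Nat) : Int) * (a :: t).getD k 0 := by
            rw [show (∑ k ∈ Finset.range m, (-1:Int)^k * ((m.choose (k+1) : Nat) : Int)
                * ((a :: t).getD (k+1) 0 - (a :: t).getD k 0))
                = ∑ k ∈ Finset.range m, ((-1:Int)^k * ((m.choose (k+1) : Nat) : Int) * (a :: t).getD (k+1) 0
                  - (-1:Int)^k * ((m.choose (k+1) : Nat) : Int) * (a :: t).getD k 0) from
              Finset.sum_congr rfl (fun k _ => by ring)]
            rw [Finset.sum_sub_distrib]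
            rw [show (∑ k ∈ Finset.range m, (-1:Int)^(k+1) * ((m.choose (k+1) : Nat) : Int)
                * (a :: t).getD (k+1) 0)
                = -(∑ k ∈ Finset.range m, (-1:Int)^k * ((m.choose (k+1) : Nat) : Int) * (a :: t).getD (k+1) 0) by
              rw [← Finset.sum_neg_distrib]
              exact Finset.sum_congr rfl (fun k _ => by ring)]
            simp only [Nat.choose_zero_right, Nat.cast_one, pow_zero, one_mul, List.getD_cons_zero]
            ring
        _ = ∑ k ∈ Finset.range (m+1), (-1:Int)^k * ((m.choose k : Nat) : Int) * (a :: t).getD k 0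
            + ∑ k ∈ Finset.range (m+1), (-1:Int)^k * ((m.choose (k+1) : Nat) : Int) * (a :: t).getD k 0 := by
            rw [Finset.sum_range_succ' (f := fun k => (-1:Int)^k * ((m.choose k : Nat) : Int) * (a :: t).getD k 0)]
            rw [Finset.sum_range_succ (f := fun k => (-1:Int)^k * ((m.choose (k+1) : Nat) : Int) * (a :: t).getD k 0)]
            simp [Nat.choose_succ_self]
        _ = ∑ k ∈ Finset.range (m+1), (-1:Int)^k * (((m+1).choose (k+1) : Nat) : Int) * (a :: t).getD k 0 := by
            rw [← Finset.sum_add_distrib]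
            exact Finset.sum_congr rfl (fun k _ => by rw [pas k]; ring)

/-- A computes the closed form. -/
theorem A_eq_bform (seq : List Int) : find_alternating_sum_first_column seq = bform seq := by
  cases seq with
  | nil => simp [find_alternating_sum_first_column, bform]
  | cons a t =>
    simp only [find_alternating_sum_first_column]
    rw [tri_build (a :: t) ((a :: t).length - 1)]
    have hn : (a :: t).length - 1 + 1 = (a :: t).length := by simp
    rw [hn]
    have hmap : (List.range (a :: t).length).map (fun j =>
        if j % 2 = 0 then (((List.range (a :: t).length).map (fun i => pdiff^[i] (a :: t))).getD j []).getD 0 0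
        else -((((List.range (a :: t).length).map (fun i => pdiff^[i] (a :: t))).getD j []).getD 0 0))
        = (List.range (a :: t).length).map (fun j => (-1:Int)^j * (pdiff^[j] (a :: t)).getD 0 0) := by
      apply List.map_congr_left
      intro j hj
      have hj' : j < (a :: t).length := List.mem_range.mp hj
      have hget : ((List.range (a :: t).length).map (fun i => pdiff^[i] (a :: t))).getD j [] = pdiff^[j] (a :: t) := by
        rw [List.getD_eq_getElem _ _ (by simpa using hj'), List.getElem_map, List.getElem_range]
      rw [hget, ← my_sign_pow]
    rw [hmap, sum_map_range]
    exact G_eq_bform (a :: t).length (a :: t) rfl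

theorem choose_step (N s : Nat) :
    PySem.Int.floordiv (((N.choose (s+1) : Nat) : Int) * ((N : Int) - s - 1)) ((s : Int) + 2)
      = ((N.choose (s+2) : Nat) : Int) := by
  by_cases h : s + 1 < N
  · have h1 : ((N : Int) - s - 1) = ((N - s - 1 : Nat) : Int) := by omega
    have h2 : ((s : Int) + 2) = ((s + 2 : Nat) : Int) := by norm_cast
    rw [h1, h2, ← Nat.cast_mul, PySem.Int.floordiv_natCast]
    congr 1
    have key : N.choose (s+1) * (N - s - 1) = N.choose (s+2) * (s+2) := by
      have h2 := Nat.choose_succ_right_eq N (s+1)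
      have hsub : N - (s+1) = N - s - 1 := by omega
      rw [hsub] at h2
      exact h2.symm
    rw [key, Nat.mul_div_cancel _ (by omega)]
  · have hz : ((N.choose (s+1) : Nat) : Int) * ((N : Int) - s - 1) = 0 := by
      rcases Nat.lt_or_ge N (s+1) with hlt | hge
      · rw [Nat.choose_eq_zero_of_lt hlt]; simp
      · have : N = s + 1 := by omega
        subst this
        have : ((s + 1 : Nat) : Int) - s - 1 = 0 := by push_cast; ring
        rw [this, mul_zero]
    rw [hz]
    have hr : N.choose (s+2) = 0 := Nat.choose_eq_zero_of_lt (by omega)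
    rw [hr, PySem.Int.floordiv_eq_ediv_of_pos (by positivity)]
    simp

theorem foldB (N : Nat) : ∀ (ys : List Int) (s : Nat) (total : Int),
    ((PySem.List.enumerate ys (s : Int)).foldl
      (fun (st : Int × Int) (p : Int × Int) =>
        (if PySem.Int.mod p.1 2 = 0 then st.1 + p.2 * st.2 else st.1 - p.2 * st.2,
         PySem.Int.floordiv (st.2 * ((N : Int) - p.1 - 1)) (p.1 + 2)))
      (total, ((N.choose (s+1) : Nat) : Int))).1
    = total + ∑ k ∈ Finset.range ys.length,
        (-1 : Int) ^ (s + k) * ((N.choose (s + k + 1) : Nat) : Int) * ys.getD k 0 := by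
  intro ys
  induction ys with
  | nil => intro s total; simp [PySem.List.enumerate_nil]
  | cons x t ih =>
    intro s total
    rw [PySem.List.enumerate_cons, List.foldl_cons]
    have hmod : PySem.Int.mod (s : Int) 2 = ((s % 2 : Nat) : Int) := PySem.Int.mod_natCast s 2
    have htot : (if PySem.Int.mod (s : Int) 2 = 0 then total + x * ((N.choose (s+1) : Nat) : Int)
        else total - x * ((N.choose (s+1) : Nat) : Int))
        = total + (-1 : Int) ^ s * ((N.choose (s+1) : Nat) : Int) * x := by
      rw [hmod]
      rcases Nat.even_or_odd s with he | ho
      · rw [if_pos (by exact_mod_cast Nat.even_iff.mp he), he.neg_one_pow]; ring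
      · rw [if_neg (by simp [Nat.odd_iff.mp ho]), ho.neg_one_pow]; ring
    have hc : PySem.Int.floordiv (((N.choose (s+1) : Nat) : Int) * ((N : Int) - (s : Int) - 1)) ((s : Int) + 2)
        = ((N.choose ((s+1)+1) : Nat) : Int) := choose_step N s
    have hs1 : (s : Int) + 1 = ((s + 1 : Nat) : Int) := by push_cast; ring
    simp only [htot, hc, hs1]
    rw [ih (s+1) (total + (-1 : Int) ^ s * ((N.choose (s+1) : Nat) : Int) * x)]
    have hlen : (x :: t).length = t.length + 1 := rfl
    rw [hlen, Finset.sum_range_succ']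
    simp only [List.getD_cons_succ, List.getD_cons_zero, Nat.add_zero]
    rw [show (∑ k ∈ Finset.range t.length,
        (-1:Int)^(s+1+k) * ((N.choose (s+1+k+1) : Nat) : Int) * t.getD k 0)
        = ∑ k ∈ Finset.range t.length,
        (-1:Int)^(s+(k+1)) * ((N.choose (s+(k+1)+1) : Nat) : Int) * t.getD k 0 from
      Finset.sum_congr rfl (fun k _ => by
        have e1 : s + 1 + k = s + (k + 1) := by omega
        rw [e1])]
    ring

theorem B_eq_bform (seq : List Int) : find_alternating_sum_first_column_alt seq = bform seq := by
  simp only [find_alternating_sum_first_column_alt]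
  have h := foldB seq.length seq 0 0
  simp only [Nat.cast_zero, zero_add, Nat.choose_one_right] at h
  rw [h]
  unfold bform
  rfl

-- ===== VERDICT (by name: the statement is the Claim_ definition above) =====
theorem find_alternating_sum_first_column_spec : Claim_equal_find_alternating_sum_first_column := by
  intro seq _
  show find_alternating_sum_first_column seq = find_alternating_sum_first_column_alt seq
  rw [A_eq_bform, B_eq_bform]
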